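-- pv_equiv track=rewrite | github.com/herolava259/Coding-Interview-Practice | bioinfomantic/Bioinformantics_Course2/C2_W4/LeaderboardCyclopeptideProblem.py | CycloSubPeptides
-- ===== SOURCE A (Python) =====
-- def CycloSubPeptides(Peptide):
--     lis_subpeptides = [[]]
--     n = len(Peptide)
--
--     for i in range(n):
--         for j in range(1,n,1):
--             k = i+j
--             subpeptide = []
--             if k > n:
--                 subpeptide.extend(Peptide[i:n].copy())
--                 subpeptide.extend(Peptide[0:k-n].copy())
--             else:
--                 subpeptide.extend((Peptide[i:k]))
--
--             lis_subpeptides.append(subpeptide)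
--     lis_subpeptides.append(Peptide.copy())
--     return lis_subpeptides
-- ===== SOURCE B (Python) =====
-- def CycloSubPeptides(Peptide):
--     n = len(Peptide)
--     result = [[]]
--     for i in range(n):
--         rotation = Peptide[i:] + Peptide[:i]
--         window = []
--         for x in rotation[:n - 1]:
--             window = window + [x]
--             result.append(window)
--     result.append(list(Peptide))
--     return result
-- ===== Notes on version B (the rewrite author's own statement) =====
-- stated objective: alternative
-- what changed: B builds, for each start position, the full rotation of the peptide once and then grows a running window one element at a time over that rotation, appending each window; no per-(i,j) slicing and no wraparound branch remain.
import Mathlib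
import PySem

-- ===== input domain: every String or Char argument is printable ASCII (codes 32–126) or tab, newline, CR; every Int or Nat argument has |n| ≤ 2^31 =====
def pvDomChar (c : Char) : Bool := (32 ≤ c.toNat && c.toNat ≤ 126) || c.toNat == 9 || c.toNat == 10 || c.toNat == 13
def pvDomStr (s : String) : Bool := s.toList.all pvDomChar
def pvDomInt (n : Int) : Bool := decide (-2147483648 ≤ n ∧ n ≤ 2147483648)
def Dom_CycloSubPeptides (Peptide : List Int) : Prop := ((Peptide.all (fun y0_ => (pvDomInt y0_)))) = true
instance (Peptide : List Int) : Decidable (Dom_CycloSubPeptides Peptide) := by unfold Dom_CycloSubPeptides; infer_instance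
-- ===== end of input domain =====

-- B builds each start's rotation once and grows a running window element by element
-- instead of slicing per (i,j) with a wraparound branch; equivalence proved on all inputs.

-- ===== PORT A =====
def CycloSubPeptides (Peptide : List Int) : List (List Int) :=
  let n : Int := Peptide.length
  let lis_subpeptides :=
    (PySem.List.pyRange 0 n 1).foldl (fun lis i =>
      (PySem.List.pyRange 1 n 1).foldl (fun lis j =>
        let k := i + j
        let subpeptide : List Int := []
        let subpeptide :=
          if k > n then
            (subpeptide ++ PySem.List.slice Peptide (some i) (some n)) ++
              PySem.List.slice Peptide (some 0) (some (k - n))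
          else
            subpeptide ++ PySem.List.slice Peptide (some i) (some k)
        lis ++ [subpeptide]) lis) [([] : List Int)]
  lis_subpeptides ++ [Peptide]

-- ===== PORT B =====
def CycloSubPeptides_alt (Peptide : List Int) : List (List Int) :=
  let n : Int := Peptide.length
  let result :=
    (PySem.List.pyRange 0 n 1).foldl (fun result i =>
      let rotation :=
        PySem.List.slice Peptide (some i) none ++ PySem.List.slice Peptide none (some i)
      ((PySem.List.slice rotation none (some (n - 1))).foldl
        (fun st x => (st.1 ++ [x], st.2 ++ [st.1 ++ [x]]))
        (([] : List Int), result)).2) [([] : List Int)]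
  result ++ [Peptide]

-- ===== PRECONDITION & SPEC =====
def Spec_CycloSubPeptides (Peptide : List Int) (out : List (List Int)) : Prop := out = CycloSubPeptides_alt Peptide
instance (Peptide : List Int) (out : List (List Int)) : Decidable (Spec_CycloSubPeptides Peptide out) := by unfold Spec_CycloSubPeptides; infer_instance

-- ===== CLAIM (what is proved, stated in full; the proofs are below) =====
def Claim_equal_CycloSubPeptides : Prop := ∀ (Peptide : List Int), Dom_CycloSubPeptides Peptide → Spec_CycloSubPeptides Peptide (CycloSubPeptides Peptide)

-- ===== LEMMAS AND PROOFS =====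

-- the slice identity behind the cyclic window: a wraparound pair of slices is one slice of the doubled list
lemma slice_doubled (P : List Int) (i j : Int) (hi0 : 0 ≤ i) (hin : i < (P.length : Int))
    (hj1 : 1 ≤ j) (hjn : j < (P.length : Int)) :
    (if i + j > (P.length : Int) then
        PySem.List.slice P (some i) (some (P.length : Int)) ++
          PySem.List.slice P (some 0) (some (i + j - P.length))
      else PySem.List.slice P (some i) (some (i + j))) =
    PySem.List.slice (P ++ P) (some i) (some (i + j)) := by
  have hij0 : (0:Int) ≤ i + j := by omega
  have hdrop : (P ++ P).drop i.toNat = P.drop i.toNat ++ P :=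
    List.drop_append_of_le_length (by omega)
  have hlen : (P.drop i.toNat).length = P.length - i.toNat := by simp
  split_ifs with h
  · rw [PySem.List.slice_toNat _ hi0 hij0, PySem.List.slice_toNat _ hi0 (by omega),
        PySem.List.slice_toNat _ le_rfl (by omega), hdrop, List.take_append]
    have e1 : (P.drop i.toNat).take ((P.length : Int).toNat - i.toNat) = P.drop i.toNat :=
      List.take_of_length_le (by omega)
    have e2 : (P.drop i.toNat).take ((i + j).toNat - i.toNat) = P.drop i.toNat :=
      List.take_of_length_le (by omega)
    rw [e1, e2]
    congr 1
    simp only [List.drop_zero, Int.toNat_zero, Nat.sub_zero]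
    congr 1
    rw [hlen]
    omega
  · rw [PySem.List.slice_toNat _ hi0 hij0, PySem.List.slice_toNat _ hi0 hij0, hdrop,
        List.take_append]
    have hz : (i + j).toNat - i.toNat - (P.drop i.toNat).length = 0 := by
      rw [hlen]; omega
    rw [hz, List.take_zero, List.append_nil]

-- B's inner loop: growing a window and appending each state collects the nonempty prefixes
lemma fold_window (l w0 : List Int) (o0 : List (List Int)) :
    l.foldl (fun st x => (st.1 ++ [x], st.2 ++ [st.1 ++ [x]])) (w0, o0) =
    (w0 ++ l, o0 ++ (List.range l.length).map (fun k => w0 ++ l.take (k + 1))) := by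
  induction l generalizing w0 o0 with
  | nil => simp
  | cons x t ih =>
    simp only [List.foldl_cons, ih, List.length_cons, List.range_succ_eq_map,
      List.map_cons, List.map_map]
    refine Prod.ext ?_ ?_ <;>
      simp [Function.comp, List.append_assoc, List.take_succ_cons]

-- a prefix of the rotation is the corresponding prefix of the doubled list's tail
lemma take_rot (P : List Int) (i j : Nat) (hi : i ≤ P.length) (hj : j ≤ P.length) :
    (P.drop i ++ P.take i).take j = ((P ++ P).drop i).take j := by
  rw [List.drop_append_of_le_length hi, List.take_append, List.take_append, List.take_take]
  congr 1
  apply List.take_eq_take_iff.mpr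
  simp only [List.length_drop]
  omega

-- ===== VERDICT (by name: the statement is the Claim_ definition above) =====
theorem CycloSubPeptides_spec : Claim_equal_CycloSubPeptides := by
  intro P _
  show CycloSubPeptides P = CycloSubPeptides_alt P
  unfold CycloSubPeptides CycloSubPeptides_alt
  simp only [List.nil_append]
  congr 1
  -- A's inner loop collects the doubled-list windows
  have hGA : ∀ (lis : List (List Int)) (i : Int), i ∈ PySem.List.pyRange 0 (P.length : Int) 1 →
      (PySem.List.pyRange 1 (P.length : Int) 1).foldl (fun lis j =>
        lis ++ [if i + j > (P.length : Int) then
            PySem.List.slice P (some i) (some (P.length : Int)) ++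
              PySem.List.slice P (some 0) (some (i + j - P.length))
          else PySem.List.slice P (some i) (some (i + j))]) lis =
      lis ++ (PySem.List.pyRange 1 (P.length : Int) 1).map
        (fun j => PySem.List.slice (P ++ P) (some i) (some (i + j))) := by
    intro lis i hi
    obtain ⟨hi0, hin⟩ := PySem.List.mem_pyRange_one.mp hi
    have h1 : ∀ (acc : List (List Int)) (j : Int), j ∈ PySem.List.pyRange 1 (P.length : Int) 1 →
        acc ++ [if i + j > (P.length : Int) then
            PySem.List.slice P (some i) (some (P.length : Int)) ++
              PySem.List.slice P (some 0) (some (i + j - P.length))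
          else PySem.List.slice P (some i) (some (i + j))] =
        acc ++ [PySem.List.slice (P ++ P) (some i) (some (i + j))] := by
      intro acc j hj
      obtain ⟨hj1, hjn⟩ := PySem.List.mem_pyRange_one.mp hj
      rw [slice_doubled P i j hi0 hin hj1 hjn]
    rw [PySem.List.foldl_congr_mem (h := h1), PySem.List.foldl_append_singleton_eq_map]
  -- B's inner loop collects the rotation's prefixes, which are the same windows
  have hGB : ∀ (lis : List (List Int)) (i : Int), i ∈ PySem.List.pyRange 0 (P.length : Int) 1 →
      ((PySem.List.slice
          (PySem.List.slice P (some i) none ++ PySem.List.slice P none (some i))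
          none (some ((P.length : Int) - 1))).foldl
        (fun st x => (st.1 ++ [x], st.2 ++ [st.1 ++ [x]]))
        (([] : List Int), lis)).2 =
      lis ++ (PySem.List.pyRange 1 (P.length : Int) 1).map
        (fun j => PySem.List.slice (P ++ P) (some i) (some (i + j))) := by
    intro lis i hi
    obtain ⟨hi0, hin⟩ := PySem.List.mem_pyRange_one.mp hi
    have hiN : i.toNat ≤ P.length := by omega
    have hn1 : (0 : Int) ≤ (P.length : Int) - 1 := by omega
    rw [PySem.List.slice_from _ hi0, PySem.List.slice_to _ hi0,
      PySem.List.slice_to _ hn1, fold_window]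
    simp only [List.nil_append]
    congr 1
    have hrotlen : (P.drop i.toNat ++ P.take i.toNat).length = P.length := by
      simp; omega
    have hm : (((P.length : Int) - 1).toNat) = P.length - 1 := by omega
    rw [List.length_take, hrotlen, hm, Nat.min_eq_left (by omega),
      PySem.List.pyRange_one, List.map_map, hm]
    apply List.map_congr_left
    intro k hk
    have hk' : k < P.length - 1 := by
      have := List.mem_range.mp hk
      omega
    simp only [Function.comp_apply]
    rw [List.take_take, Nat.min_eq_left (by omega),
      take_rot P i.toNat (k + 1) hiN (by omega),
      PySem.List.slice_toNat _ hi0 (by omega)]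
    congr 1
    omega
  rw [PySem.List.foldl_congr_mem (h := hGA), PySem.List.foldl_congr_mem (h := hGB)]
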